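-- pv_equiv track=rewrite | github.com/Andrewvvvw/AOIS4 | lab1/src/ieee754/addition_subtraction.py | _sub_mantissas
-- ===== SOURCE A (Python) =====
-- from typing import List
--
-- def _sub_mantissas(m1: List[int], m2: List[int]) -> List[int]:
--     result = []
--     borrow = 0
--     for i in range(len(m1) - 1, -1, -1):
--         diff = m1[i] - m2[i] - borrow
--         if diff < 0:
--             diff += 2
--             borrow = 1
--         else:
--             borrow = 0
--         result.append(diff)
--     return result[::-1]
-- ===== SOURCE B (Python) =====
-- from typing import List
--
-- def _sub_mantissas(m1: List[int], m2: List[int]) -> List[int]: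
--     d = [m1[i] - m2[i] for i in range(len(m1))]
--     s = [0]                     # borrow flags, built right-to-left: next entry = sign of first nonzero suffix diff
--     sign = 0
--     for x in reversed(d):
--         if x != 0:
--             sign = 1 if x < 0 else 0
--         s.append(sign)
--     s.reverse()                 # s[i] = borrow produced at position i; s[len(d)] = 0
--     return [d[i] - s[i + 1] + 2 * s[i] for i in range(len(d))]
-- ===== Notes on version B (the rewrite author's own statement) =====
-- stated objective: alternative
-- what changed: Instead of simulating per-digit subtraction with a conditional borrow (diff += 2) carried through a reversed loop and a final list reversal, B computes the difference list, derives every borrow flag directly as the sign of the first nonzero difference in the suffix, and emits each output digit by the arithmetic formula d[i] - s[i+1] + 2*s[i].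
import Mathlib
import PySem

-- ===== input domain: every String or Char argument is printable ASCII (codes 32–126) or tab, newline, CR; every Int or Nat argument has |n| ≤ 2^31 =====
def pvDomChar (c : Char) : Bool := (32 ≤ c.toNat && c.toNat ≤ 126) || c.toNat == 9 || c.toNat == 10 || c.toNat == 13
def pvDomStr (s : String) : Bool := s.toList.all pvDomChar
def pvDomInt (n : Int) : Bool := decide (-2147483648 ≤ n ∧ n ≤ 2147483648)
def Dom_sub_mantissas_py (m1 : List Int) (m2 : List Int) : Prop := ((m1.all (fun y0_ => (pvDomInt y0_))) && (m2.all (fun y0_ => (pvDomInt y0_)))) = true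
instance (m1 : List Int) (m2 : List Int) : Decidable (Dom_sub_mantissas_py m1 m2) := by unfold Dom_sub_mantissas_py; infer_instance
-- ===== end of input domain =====

-- B replaces A's sequential conditional borrow simulation by computing the borrow flags
-- directly (sign of the first nonzero suffix difference) and emitting digits arithmetically
-- (objective: alternative, same cost).

-- ===== PORT A =====
-- literal port of A: index loop i = len(m1)-1 .. 0, state (result, borrow), final result[::-1]
def sub_mantissas_py (m1 : List Int) (m2 : List Int) : List Int :=
  let st := (PySem.List.pyRange ((m1.length : Int) - 1) (-1) (-1)).foldl
    (fun (st : List Int × Int) i =>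
      let diff := PySem.List.pyGetD m1 i 0 - PySem.List.pyGetD m2 i 0 - st.2
      if diff < 0 then (st.1 ++ [diff + 2], 1) else (st.1 ++ [diff], 0))
    ([], 0)
  st.1.reverse   -- result[::-1]

-- ===== PORT B =====
-- literal port of Source B: difference list, right-to-left sign scan into s, reverse, arithmetic emit
def sub_mantissas_py_alt (m1 : List Int) (m2 : List Int) : List Int :=
  let d := (PySem.List.pyRange 0 (m1.length : Int) 1).map
    (fun i => PySem.List.pyGetD m1 i 0 - PySem.List.pyGetD m2 i 0)
  let s := ((d.reverse.foldl
      (fun (st : Int × List Int) x =>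
        let sign := if x ≠ 0 then (if x < 0 then 1 else 0) else st.1
        (sign, st.2 ++ [sign]))
      (0, [0])).2).reverse
  (PySem.List.pyRange 0 (d.length : Int) 1).map
    (fun i => PySem.List.pyGetD d i 0 - PySem.List.pyGetD s (i + 1) 0 + 2 * PySem.List.pyGetD s i 0)

-- ===== PRECONDITION & SPEC =====
-- Pre_ excludes only inputs where A raises IndexError (m2 shorter than m1).
def Pre_sub_mantissas_py (m1 : List Int) (m2 : List Int) : Prop := m1.length ≤ m2.length
instance (m1 : List Int) (m2 : List Int) : Decidable (Pre_sub_mantissas_py m1 m2) := by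
  unfold Pre_sub_mantissas_py; infer_instance

def pvWitness_sub_mantissas_py : List Int × List Int := ([1, 0, 1], [0, 1, 1])

def Spec_sub_mantissas_py (m1 : List Int) (m2 : List Int) (out : List Int) : Prop :=
  out = sub_mantissas_py_alt m1 m2
instance (m1 : List Int) (m2 : List Int) (out : List Int) : Decidable (Spec_sub_mantissas_py m1 m2 out) := by
  unfold Spec_sub_mantissas_py; infer_instance

-- ===== CLAIM =====
def Claim_equal_sub_mantissas_py : Prop :=
  ∀ (m1 : List Int) (m2 : List Int), Dom_sub_mantissas_py m1 m2 →
    Pre_sub_mantissas_py m1 m2 → Spec_sub_mantissas_py m1 m2 (sub_mantissas_py m1 m2)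

-- ===== LEMMAS AND PROOFS =====

/-- A's loop on the reversed difference list: digits in emitted (reversed) order. -/
def loopA : List Int → Int → List Int
  | [], _ => []
  | x :: t, b =>
    let diff := x - b
    if diff < 0 then (diff + 2) :: loopA t 1 else diff :: loopA t 0

/-- B's digit recursion on the reversed difference list. -/
def loopB : List Int → Int → List Int
  | [], _ => []
  | x :: t, b =>
    let b' := if x ≠ 0 then (if x < 0 then 1 else 0) else b
    (x - b + 2 * b') :: loopB t b'

/-- B's sign scan on the reversed difference list (the signs appended to s). -/
def sigs : List Int → Int → List Int
  | [], _ => []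
  | x :: t, b =>
    let b' := if x ≠ 0 then (if x < 0 then 1 else 0) else b
    b' :: sigs t b'

/-- Final sign after the scan. -/
def lsig : List Int → Int → Int
  | [], b => b
  | x :: t, b => lsig t (if x ≠ 0 then (if x < 0 then 1 else 0) else b)

theorem sigs_append (u v : List Int) (b : Int) :
    sigs (u ++ v) b = sigs u b ++ sigs v (lsig u b) := by
  induction u generalizing b with
  | nil => rfl
  | cons x t ih => simp [sigs, lsig, ih]

theorem loopB_append (u v : List Int) (b : Int) :
    loopB (u ++ v) b = loopB u b ++ loopB v (lsig u b) := by
  induction u generalizing b with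
  | nil => rfl
  | cons x t ih => simp [loopB, lsig, ih]

theorem loopA_eq_loopB (rd : List Int) (b : Int) (hb : b = 0 ∨ b = 1) :
    loopA rd b = loopB rd b := by
  induction rd generalizing b with
  | nil => rfl
  | cons x t ih =>
    have hb' : (if x - b < 0 then (1:Int) else 0) = (if x ≠ 0 then (if x < 0 then 1 else 0) else b) := by
      rcases hb with hb | hb <;> subst hb <;> split_ifs <;> omega
    simp only [loopA, loopB]
    by_cases hd : x - b < 0
    · have h1 : (if x ≠ 0 then (if x < 0 then (1:Int) else 0) else b) = 1 := by
        rw [← hb', if_pos hd]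
      rw [if_pos hd, h1, ih 1 (Or.inr rfl)]
      norm_num
    · have h0 : (if x ≠ 0 then (if x < 0 then (1:Int) else 0) else b) = 0 := by
        rw [← hb', if_neg hd]
      rw [if_neg hd, h0, ih 0 (Or.inl rfl)]
      norm_num

/-- B's sign fold with accumulator equals acc ++ sigs, and its state is lsig. -/
theorem foldS_spec (rd : List Int) (acc : List Int) (b : Int) :
    (rd.foldl (fun (st : Int × List Int) x =>
        let sign := if x ≠ 0 then (if x < 0 then 1 else 0) else st.1
        (sign, st.2 ++ [sign])) (b, acc))
      = (lsig rd b, acc ++ sigs rd b) := by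
  induction rd generalizing acc b with
  | nil => simp [lsig, sigs]
  | cons x t ih =>
    simp only [List.foldl_cons, ih]
    simp [lsig, sigs]

theorem head_S (w : List Int) (b : Int) :
    (((sigs w b).reverse ++ [b]).getD 0 0) = lsig w b := by
  induction w generalizing b with
  | nil => simp [sigs, lsig]
  | cons y w ih =>
    simp only [sigs, lsig]
    generalize (if y ≠ 0 then (if y < 0 then (1:Int) else 0) else b) = u
    obtain ⟨p, P, hP⟩ := List.exists_cons_of_ne_nil
      (show (sigs w u).reverse ++ [u] ≠ [] by simp)
    have h2 := ih u
    rw [hP] at h2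
    rw [List.reverse_cons, hP]
    simpa using h2

/-- The arithmetic emit over the suffix-sign list equals loopB on the reversed list. -/
theorem emit_eq_loopB (d : List Int) (b : Int) :
    (List.range d.length).map (fun k =>
        d.getD k 0 - ((sigs d.reverse b).reverse ++ [b]).getD (k + 1) 0
          + 2 * ((sigs d.reverse b).reverse ++ [b]).getD k 0)
      = (loopB d.reverse b).reverse := by
  induction d with
  | nil => simp [sigs, loopB]
  | cons x t ih =>
    simp only [List.reverse_cons]
    rw [sigs_append, loopB_append]
    simp only [sigs, loopB, List.reverse_append]
    rw [List.length_cons, List.range_succ_eq_map, List.map_cons, List.map_map]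
    simp only [Function.comp_def, Nat.succ_eq_add_one, List.reverse_singleton,
      List.cons_append, List.nil_append]
    simp only [List.getD_cons_zero, List.getD_cons_succ]
    rw [head_S, ih]

/-- A's index fold equals loopA over the mapped difference list. -/
theorem foldA_index (idx : List Int) (m1 m2 : List Int) (acc : List Int) (b : Int) :
    (idx.foldl (fun (st : List Int × Int) i =>
        let diff := PySem.List.pyGetD m1 i 0 - PySem.List.pyGetD m2 i 0 - st.2
        if diff < 0 then (st.1 ++ [diff + 2], 1) else (st.1 ++ [diff], 0)) (acc, b)).1
      = acc ++ loopA (idx.map (fun i => PySem.List.pyGetD m1 i 0 - PySem.List.pyGetD m2 i 0)) b := by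
  induction idx generalizing acc b with
  | nil => simp [loopA]
  | cons i idx ih =>
    simp only [List.foldl_cons, List.map_cons, loopA]
    split_ifs with h <;> rw [ih] <;> simp

theorem portA_eq (m1 m2 : List Int) :
    sub_mantissas_py m1 m2
      = (loopA ((PySem.List.pyRange 0 (m1.length : Int) 1).map
          (fun i => PySem.List.pyGetD m1 i 0 - PySem.List.pyGetD m2 i 0)).reverse 0).reverse := by
  unfold sub_mantissas_py
  dsimp only
  rw [foldA_index, PySem.List.pyRange_neg_one_eq_reverse]
  norm_num

theorem portB_eq (m1 m2 : List Int) :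
    sub_mantissas_py_alt m1 m2
      = (loopB ((PySem.List.pyRange 0 (m1.length : Int) 1).map
          (fun i => PySem.List.pyGetD m1 i 0 - PySem.List.pyGetD m2 i 0)).reverse 0).reverse := by
  unfold sub_mantissas_py_alt
  dsimp only
  rw [foldS_spec]
  generalize ((PySem.List.pyRange 0 (m1.length : Int) 1).map
      (fun i => PySem.List.pyGetD m1 i 0 - PySem.List.pyGetD m2 i 0)) = d
  rw [← emit_eq_loopB d 0]
  have hs : ([(0:Int)] ++ sigs d.reverse 0).reverse = (sigs d.reverse 0).reverse ++ [0] := by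
    simp
  rw [hs]
  rw [show ((d.length : Int)) = ((d.length : Int) : Int) from rfl]
  rw [PySem.List.pyRange_zero_natCast, List.map_map]
  apply List.map_congr_left
  intro k hk
  have hcast : ((k : Int) + 1) = (((k + 1 : Nat)) : Int) := by push_cast; ring
  simp only [Function.comp_def, hcast, PySem.List.pyGetD_natCast]

-- ===== VERDICT =====
theorem sub_mantissas_py_spec : Claim_equal_sub_mantissas_py := by
  intro m1 m2 _ _
  unfold Spec_sub_mantissas_py
  rw [portA_eq, portB_eq, loopA_eq_loopB _ 0 (Or.inl rfl)]
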